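-- pv_equiv track=rewrite | github.com/venkatn427/pythonlearning | day11.py | equal_strings
-- ===== SOURCE A (Python) =====
-- def equal_strings(s1, s2):
--     def get_dict(str1):
--         d = {}
--         for each in str1:
--             if each in d:
--                 d[each] += 1
--             else:
--                 d[each] = 1
--         return d
--     sd1 = sorted(get_dict(s1))
--     sd2 = sorted(get_dict(s2))
--
--     return sd1 == sd2
-- ===== SOURCE B (Python) =====
-- def equal_strings(s1, s2):
--     return set(s1) == set(s2)
-- ===== Notes on version B (the rewrite author's own statement) =====
-- stated objective: simpler
-- what changed: Replaces the counting dict, key extraction and two sorts with a direct comparison of the two distinct-character sets (set(s1) == set(s2)); no counts are maintained and no sort pass happens.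
import Mathlib
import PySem

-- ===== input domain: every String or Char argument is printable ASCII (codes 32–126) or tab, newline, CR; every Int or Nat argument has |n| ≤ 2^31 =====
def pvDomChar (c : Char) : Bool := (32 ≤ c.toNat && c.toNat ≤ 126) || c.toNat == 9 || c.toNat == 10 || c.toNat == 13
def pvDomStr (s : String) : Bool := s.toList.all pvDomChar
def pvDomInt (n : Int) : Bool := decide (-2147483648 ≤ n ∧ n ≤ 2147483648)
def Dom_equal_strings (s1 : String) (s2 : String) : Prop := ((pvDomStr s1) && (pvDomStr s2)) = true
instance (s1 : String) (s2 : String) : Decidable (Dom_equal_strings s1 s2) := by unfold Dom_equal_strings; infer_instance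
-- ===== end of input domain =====

-- B replaces A's count-dict + key sort + sorted-list comparison by a direct set comparison (simpler; same result).

-- ===== PORT A =====
-- inner helper get_dict: counting dict over the characters
def getDictA (str1 : List Char) : PySem.Dict Char Int :=
  str1.foldl
    (fun d each =>
      if d.contains each then d.modify each 0 (· + 1) else d.insert each 1)
    PySem.Dict.empty

def equal_strings (s1 : String) (s2 : String) : Bool :=
  let sd1 := PySem.List.sorted (getDictA s1.toList).keys (fun x => x) false
  let sd2 := PySem.List.sorted (getDictA s2.toList).keys (fun x => x) false
  sd1 == sd2

-- ===== PORT B =====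
def equal_strings_alt (s1 : String) (s2 : String) : Bool :=
  PySem.Set.equal (PySem.Set.ofList s1.toList) (PySem.Set.ofList s2.toList)

-- ===== PRECONDITION & SPEC =====
def Spec_equal_strings (s1 : String) (s2 : String) (out : Bool) : Prop := out = equal_strings_alt s1 s2
instance (s1 : String) (s2 : String) (out : Bool) : Decidable (Spec_equal_strings s1 s2 out) := by unfold Spec_equal_strings; infer_instance

-- ===== CLAIM (what is proved, stated in full; the proofs are below) =====
def Claim_equal_equal_strings : Prop := ∀ (s1 : String) (s2 : String), Dom_equal_strings s1 s2 → Spec_equal_strings s1 s2 (equal_strings s1 s2)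

-- ===== LEMMAS AND PROOFS =====

-- A's loop body is exactly Counter's update step
theorem getDictA_step_eq (d : PySem.Dict Char Int) (x : Char) :
    (if d.contains x then d.modify x 0 (· + 1) else d.insert x 1) = d.modify x 0 (· + 1) := by
  by_cases h : d.contains x
  · simp [h]
  · have hc : d.contains x = false := by simpa using h
    simp [h, PySem.Dict.modify, PySem.Dict.getD_of_not_contains (h := hc)]

theorem getDictA_eq_counter (l : List Char) : getDictA l = PySem.Dict.counter l := by
  unfold getDictA
  have hfn : (fun (d : PySem.Dict Char Int) (each : Char) =>
      if d.contains each then d.modify each 0 (· + 1) else d.insert each 1)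
      = fun d each => d.modify each 0 (· + 1) := by
    funext d x; exact getDictA_step_eq d x
  rw [hfn, PySem.Dict.counter_eq_foldl]

theorem keys_getDictA (l : List Char) : (getDictA l).keys = PySem.Set.ofList l := by
  rw [getDictA_eq_counter, PySem.Dict.keys_counter]

-- sorted distinct-char lists are equal iff the sets are equal
theorem sorted_sets_eq_iff (l1 l2 : List Char) :
    (PySem.List.sorted (PySem.Set.ofList l1) (fun x => x) false
      = PySem.List.sorted (PySem.Set.ofList l2) (fun x => x) false)
      ↔ PySem.Set.equal (PySem.Set.ofList l1) (PySem.Set.ofList l2) = true := by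
  rw [PySem.List.sorted_id_eq_sorted_id_iff_perm]
  constructor
  · intro hperm
    simp only [PySem.Set.equal, PySem.Set.issubset, Bool.and_eq_true, List.all_eq_true]
    constructor <;> intro x hx
    · simpa [PySem.Set.contains] using hperm.mem_iff.mp hx
    · simpa [PySem.Set.contains] using hperm.mem_iff.mpr hx
  · intro heq
    simp only [PySem.Set.equal, PySem.Set.issubset, Bool.and_eq_true, List.all_eq_true] at heq
    rw [List.perm_ext_iff_of_nodup (PySem.Set.nodup_ofList l1) (PySem.Set.nodup_ofList l2)]
    intro a
    constructor <;> intro ha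
    · have := heq.1 a ha; simpa [PySem.Set.contains] using this
    · have := heq.2 a ha; simpa [PySem.Set.contains] using this

-- ===== VERDICT (by name: the statement is the Claim_ definition above) =====
theorem equal_strings_spec : Claim_equal_equal_strings := by
  intro s1 s2 _
  unfold Spec_equal_strings equal_strings equal_strings_alt
  simp only [keys_getDictA]
  rcases h : PySem.Set.equal (PySem.Set.ofList s1.toList) (PySem.Set.ofList s2.toList)
  · have : ¬ (PySem.List.sorted (PySem.Set.ofList s1.toList) (fun x => x) false
        = PySem.List.sorted (PySem.Set.ofList s2.toList) (fun x => x) false) := by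
      intro hc
      rw [(sorted_sets_eq_iff s1.toList s2.toList).mp hc] at h
      simp at h
    simpa using this
  · have := (sorted_sets_eq_iff s1.toList s2.toList).mpr h
    simpa using this
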